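-- pv_equiv track=rewrite | github.com/MooVI/commutator | commutator.py | sort_pauli_list
-- ===== SOURCE A (Python) =====
-- def sort_pauli_list(a):
--     i = 0
--     nflips = 0
--     l = len(a) - 1
--     while i < l:
--         diff = a[i] - a[i+1]
--         if diff > 0:
--             a[i], a[i+1] = a[i+1], a[i]
--             if diff == 1:
--                 if a[i] % 2 == 1:
--                     nflips += 1
--             while i>0 and a[i] < a[i-1]:
--                 a[i], a[i-1] = a[i-1], a[i]
--                 if a[i] - a[i-1] == 1:
--                     if a[i-1] % 2 == 1:
--                         nflips +=1
--                 i -= 1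
--         i+=1
--     return (-1)**nflips
-- ===== SOURCE B (Python) =====
-- def sort_pauli_list(a):
--     seen = {}
--     nflips = 0
--     for x in a:
--         if x % 2 == 1:
--             nflips += seen.get(x + 1, 0)
--         seen[x] = seen.get(x, 0) + 1
--     return -1 if nflips % 2 else 1
-- ===== Notes on version B (the rewrite author's own statement) =====
-- stated objective: faster
-- what changed: A gnome-sorts the list in place and counts sign flips swap by swap; B never sorts: it makes a single pass with a value->count dictionary, adding for each odd x the number of earlier occurrences of x+1 (the restricted inversions), and returns the parity as a sign.
import Mathlib
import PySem

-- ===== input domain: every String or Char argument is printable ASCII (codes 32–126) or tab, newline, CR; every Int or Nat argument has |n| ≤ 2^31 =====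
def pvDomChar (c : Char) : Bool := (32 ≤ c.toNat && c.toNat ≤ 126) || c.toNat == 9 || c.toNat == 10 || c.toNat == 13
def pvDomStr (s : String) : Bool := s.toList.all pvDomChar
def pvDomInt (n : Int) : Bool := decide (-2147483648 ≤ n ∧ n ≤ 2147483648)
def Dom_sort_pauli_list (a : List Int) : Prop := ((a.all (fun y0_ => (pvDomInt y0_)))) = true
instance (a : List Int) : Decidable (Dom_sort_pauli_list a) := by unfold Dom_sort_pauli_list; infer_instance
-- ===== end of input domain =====

-- B replaces A's in-place gnome sort (quadratic, counts flips swap by swap) with one linear pass over the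
-- unmodified list using a value->count dict; equivalence is about the RETURN value only (Python A sorts the
-- argument list in place, Python B leaves it untouched).

-- ===== PORT A =====
-- Helpers needed by the port's termination argument (cited in decreasing_by):
-- number of pairs i<j with φ a[i] a[j], and the fact that an adjacent swap of an
-- out-of-order pair strictly decreases the plain inversion count spN.

/-- pairs (earlier s, later t) of the list with `φ s t`. -/
def spPairs (φ : Int → Int → Bool) : List Int → Nat
  | [] => 0
  | x :: xs => xs.countP (φ x) + spPairs φ xs

/-- plain inversion count (pairs earlier s, later t with t < s). -/
def spN (l : List Int) : Nat := spPairs (fun s t => decide (t < s)) l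

theorem countP_middle_swap (p : Int → Bool) (u : List Int) (x z : Int) (w : List Int) :
    (u ++ x :: z :: w).countP p = (u ++ z :: x :: w).countP p := by
  simp [List.countP_append, List.countP_cons]; omega

theorem spPairs_swap_adj (φ : Int → Int → Bool) (u : List Int) (x z : Int) (w : List Int) :
    spPairs φ (u ++ x :: z :: w) + (if φ z x then 1 else 0)
      = spPairs φ (u ++ z :: x :: w) + (if φ x z then 1 else 0) := by
  induction u with
  | nil => simp [spPairs, List.countP_cons]; omega
  | cons h u ih =>
      simp only [List.cons_append, spPairs]
      rw [countP_middle_swap]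
      omega

theorem spN_swap_adj_lt (u : List Int) (x z : Int) (w : List Int) (hlt : x < z) :
    spN (u ++ x :: z :: w) < spN (u ++ z :: x :: w) := by
  have h := spPairs_swap_adj (fun s t => decide (t < s)) u x z w
  simp only [spN]
  have h1 : (decide (x < z)) = true := by simp [hlt]
  have h2 : (decide (z < x)) = false := by simp; omega
  rw [h1, h2] at h
  simp at h
  omega

/-- Python's `a[i], a[j] = a[j], a[i]` (RHS read from the original list). -/
def pvSwap (a : List Int) (i j : Nat) : List Int := (a.set i (a.getD j 0)).set j (a.getD i 0)

theorem getD_append_cons (u : List Int) (x : Int) (w : List Int) :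
    (u ++ x :: w).getD u.length 0 = x := by
  induction u with
  | nil => rfl
  | cons h u ih => simpa using ih

theorem getD_append_cons_succ (u : List Int) (x z : Int) (w : List Int) :
    (u ++ x :: z :: w).getD (u.length + 1) 0 = z := by
  have := getD_append_cons (u ++ [x]) z w
  simpa using this

theorem pvSwap_right (u : List Int) (x z : Int) (w : List Int) :
    pvSwap (u ++ x :: z :: w) u.length (u.length + 1) = u ++ z :: x :: w := by
  unfold pvSwap
  induction u with
  | nil => rfl
  | cons h u ih => simpa using ih

theorem pvSwap_left (u : List Int) (z x : Int) (w : List Int) :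
    pvSwap (u ++ z :: x :: w) (u.length + 1) u.length = u ++ x :: z :: w := by
  unfold pvSwap
  induction u with
  | nil => rfl
  | cons h u ih => simpa using ih

theorem length_pvSwap (a : List Int) (i j : Nat) : (pvSwap a i j).length = a.length := by
  simp [pvSwap]

theorem decomp_at (a : List Int) (i : Nat) (h : i + 1 < a.length) :
    ∃ u x z w, a = u ++ x :: z :: w ∧ u.length = i := by
  induction a generalizing i with
  | nil => simp at h
  | cons y t ih =>
      cases i with
      | zero =>
          cases t with
          | nil => simp at h
          | cons y2 t2 => exact ⟨[], y, y2, t2, rfl, rfl⟩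
      | succ j =>
          obtain ⟨u, x, z, w, ht, hu⟩ := ih j (by simp at h; omega)
          exact ⟨y :: u, x, z, w, by rw [ht]; rfl, by simp [hu]⟩

/-- the inner `while i>0 and a[i] < a[i-1]` loop of A: bubbles the element at `i` down. -/
def sp_inner (a : List Int) (i : Nat) (nflips : Nat) : List Int × Nat × Nat :=
  if h : 0 < i ∧ a.getD i 0 < a.getD (i - 1) 0 then
    let a2 := pvSwap a i (i - 1)
    let nf := if a2.getD i 0 - a2.getD (i - 1) 0 = 1 ∧ PySem.Int.mod (a2.getD (i - 1) 0) 2 = 1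
              then nflips + 1 else nflips
    sp_inner a2 (i - 1) nf
  else (a, i, nflips)
termination_by i
decreasing_by omega

theorem sp_inner_spN_le (a : List Int) (i : Nat) (nflips : Nat) (hi : i < a.length) :
    spN (sp_inner a i nflips).1 ≤ spN a := by
  fun_induction sp_inner a i nflips with
  | case1 a i nflips h a2 nf ih =>
      obtain ⟨u, x, z, w, ha, hu⟩ := decomp_at a (i - 1) (by omega)
      have hiu : i = u.length + 1 := by omega
      have hx : a.getD (i - 1) 0 = x := by
        rw [ha, hiu]; simpa using getD_append_cons u x (z :: w)
      have hz : a.getD i 0 = z := by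
        rw [ha, hiu]; exact getD_append_cons_succ u x z w
      have ha2 : a2 = u ++ z :: x :: w := by
        simp only [a2, ha, hiu]
        simpa using pvSwap_left u x z w
      have hlt : spN a2 < spN a := by
        rw [ha2, ha]
        exact spN_swap_adj_lt u z x w (by rw [hx, hz] at h; exact h.2)
      have hle : spN (sp_inner a2 (i - 1) nf).1 ≤ spN a2 := by
        apply ih
        have hl2 : a2.length = a.length := by simp only [a2]; exact length_pvSwap a i (i - 1)
        omega
      omega
  | case2 => exact Nat.le_refl _

/-- the outer `while i < l` loop of A.  `l = len(a) - 1` is recomputed instead of cached: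
    the length of `a` never changes (swaps preserve it), so the value is Python's cached `l`. -/
def sp_outer (a : List Int) (i : Nat) (nflips : Nat) : Nat :=
  if h : i < a.length - 1 then
    let diff := a.getD i 0 - a.getD (i + 1) 0
    if hd : 0 < diff then
      let a2 := pvSwap a i (i + 1)
      let nf := if diff = 1 ∧ PySem.Int.mod (a2.getD i 0) 2 = 1 then nflips + 1 else nflips
      let r := sp_inner a2 i nf
      sp_outer r.1 (r.2.1 + 1) r.2.2
    else
      sp_outer a (i + 1) nflips
  else nflips
termination_by (spN a, a.length - i)
decreasing_by
  · apply Prod.Lex.left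
    obtain ⟨u, x, z, w, ha, hu⟩ := decomp_at a i (by omega)
    have hx : a.getD i 0 = x := by rw [ha, ← hu]; exact getD_append_cons u x (z :: w)
    have hz : a.getD (i + 1) 0 = z := by rw [ha, ← hu]; exact getD_append_cons_succ u x z w
    have h1 : spN (pvSwap a i (i + 1)) < spN a := by
      rw [ha, ← hu, pvSwap_right]
      exact spN_swap_adj_lt u z x w (by have hd' : (0:Int) < a.getD i 0 - a.getD (i + 1) 0 := hd; rw [hx, hz] at hd'; omega)
    refine lt_of_le_of_lt (sp_inner_spN_le _ _ _ ?_) h1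
    rw [length_pvSwap]; omega
  · apply Prod.Lex.right
    omega

/-- port of A: `(-1)**nflips` where nflips is accumulated by the gnome-sort loop.
    All indices the Python touches are in range, so plain `getD` is exact; the loop
    counters i and nflips are never negative, hence `Nat`. -/
def sort_pauli_list (a : List Int) : Int := (-1 : Int) ^ (sp_outer a 0 0)

-- ===== PORT B =====
/-- B's single pass: for each x (odd), add the number of earlier occurrences of x+1
    (looked up in the running counter dict), then count x itself. -/
def sp_scan (l : List Int) (seen : PySem.Dict Int Nat) (nflips : Nat) : Nat :=
  match l with
  | [] => nflips
  | x :: rest =>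
      let nf := if PySem.Int.mod x 2 = 1 then nflips + seen.getD (x + 1) 0 else nflips
      sp_scan rest (seen.insert x (seen.getD x 0 + 1)) nf

/-- port of B: sign of the parity of the restricted-inversion count
    (`-1 if nflips % 2 else 1`; for a Nat the truthiness test is `% 2 = 1`). -/
def sort_pauli_list_alt (a : List Int) : Int :=
  let n := sp_scan a PySem.Dict.empty 0
  if n % 2 = 1 then -1 else 1

-- ===== PRECONDITION & SPEC =====
def Spec_sort_pauli_list (a : List Int) (out : Int) : Prop := out = sort_pauli_list_alt a
instance (a : List Int) (out : Int) : Decidable (Spec_sort_pauli_list a out) := by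
  unfold Spec_sort_pauli_list; infer_instance

-- ===== CLAIM (what is proved, stated in full; the proofs are below) =====
def Claim_equal_sort_pauli_list : Prop :=
  ∀ (a : List Int), Dom_sort_pauli_list a → Spec_sort_pauli_list a (sort_pauli_list a)

-- ===== LEMMAS AND PROOFS =====

/-- the flip predicate: earlier element s, later element t, s = t+1 with t odd. -/
def phiW : Int → Int → Bool := fun s t => decide (s = t + 1 ∧ PySem.Int.mod t 2 = 1)

/-- restricted inversion count: pairs (earlier s, later t) with s = t+1, t odd. -/
def spW (l : List Int) : Nat := spPairs phiW l

/-- cross pairs: s from A (earlier), t from B (later), φ s t. -/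
def spCross (φ : Int → Int → Bool) (A B : List Int) : Nat :=
  (A.map (fun s => B.countP (φ s))).sum

theorem spCross_nil_left (φ : Int → Int → Bool) (B : List Int) : spCross φ [] B = 0 := rfl

theorem spCross_cons_left (φ : Int → Int → Bool) (s : Int) (A B : List Int) :
    spCross φ (s :: A) B = B.countP (φ s) + spCross φ A B := by
  simp [spCross]

theorem spCross_append_left (φ : Int → Int → Bool) (A B C : List Int) :
    spCross φ (A ++ B) C = spCross φ A C + spCross φ B C := by
  simp [spCross]

theorem spCross_singleton_left (φ : Int → Int → Bool) (s : Int) (B : List Int) :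
    spCross φ [s] B = B.countP (φ s) := by
  simp [spCross]

theorem spCross_cons_right (φ : Int → Int → Bool) (A : List Int) (x : Int) (B : List Int) :
    spCross φ A (x :: B) = A.countP (fun s => φ s x) + spCross φ A B := by
  induction A with
  | nil => simp [spCross]
  | cons s A ih =>
      simp only [spCross_cons_left, List.countP_cons, ih]
      omega

theorem spCross_singleton_right (φ : Int → Int → Bool) (A : List Int) (x : Int) :
    spCross φ A [x] = A.countP (fun s => φ s x) := by
  rw [spCross_cons_right]
  simp [spCross]

theorem spPairs_cons (φ : Int → Int → Bool) (x : Int) (l : List Int) :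
    spPairs φ (x :: l) = l.countP (φ x) + spPairs φ l := rfl

theorem spPairs_move (φ : Int → Int → Bool) (B2 : List Int) :
    ∀ (B1 : List Int) (x : Int) (w : List Int),
    spPairs φ (B1 ++ x :: (B2 ++ w)) + spCross φ B2 [x]
      = spPairs φ (B1 ++ B2 ++ x :: w) + spCross φ [x] B2 := by
  induction B2 with
  | nil => intro B1 x w; simp [spCross]
  | cons z B2 ih =>
      intro B1 x w
      have hadj := spPairs_swap_adj φ B1 x z (B2 ++ w)
      have hih := ih (B1 ++ [z]) x w
      simp only [List.append_assoc, List.cons_append, List.nil_append] at hih ⊢ hadj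
      rw [spCross_cons_left φ z B2 [x], spCross_singleton_right, List.countP_cons] at *
      rw [spCross_singleton_left] at *
      simp only [List.countP_cons, List.countP_nil] at *
      omega

theorem spPairs_eq_zero_of_pairwise (φ : Int → Int → Bool) (l : List Int)
    (h : List.Pairwise (fun s t => φ s t = false) l) : spPairs φ l = 0 := by
  induction l with
  | nil => rfl
  | cons x xs ih =>
      rcases List.pairwise_cons.mp h with ⟨hx, hxs⟩
      rw [spPairs_cons, ih hxs, List.countP_eq_zero.mpr (fun t ht => by simp [hx t ht])]

theorem spW_eq_zero_of_sorted (l : List Int) (h : List.IsChain (· ≤ ·) l) : spW l = 0 := by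
  apply spPairs_eq_zero_of_pairwise
  have hp : List.Pairwise (· ≤ ·) l := h.pairwise
  exact hp.imp (fun {s t} hst => by simp [phiW]; intro hs; omega)


theorem sp_inner_step (a : List Int) (i nflips : Nat)
    (h : 0 < i ∧ a.getD i 0 < a.getD (i - 1) 0) :
    sp_inner a i nflips =
      sp_inner (pvSwap a i (i - 1)) (i - 1)
        (if (pvSwap a i (i - 1)).getD i 0 - (pvSwap a i (i - 1)).getD (i - 1) 0 = 1 ∧
            PySem.Int.mod ((pvSwap a i (i - 1)).getD (i - 1) 0) 2 = 1
         then nflips + 1 else nflips) := by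
  rw [sp_inner, dif_pos h]

theorem sp_inner_stop (a : List Int) (i nflips : Nat)
    (h : ¬ (0 < i ∧ a.getD i 0 < a.getD (i - 1) 0)) :
    sp_inner a i nflips = (a, i, nflips) := by
  rw [sp_inner, dif_neg h]

theorem sp_inner_spec (u : List Int) (x : Int) :
    ∀ (w : List Int) (f : Nat),
    ∃ u1 u2, u = u1 ++ u2 ∧ (∀ z ∈ u2, x < z) ∧ (∀ y ∈ u1.getLast?, y ≤ x) ∧
      sp_inner (u ++ x :: w) u.length f =
        (u1 ++ x :: (u2 ++ w), u1.length,
         f + u2.countP (fun z => decide (z - x = 1 ∧ PySem.Int.mod x 2 = 1))) := by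
  induction u using List.reverseRecOn with
  | nil =>
      intro w f
      exact ⟨[], [], rfl, by simp, by simp, by rw [sp_inner_stop _ _ _ (by simp)]; simp⟩
  | append_singleton U z ih =>
      intro w f
      have hassoc : (U ++ [z]) ++ x :: w = U ++ z :: x :: w := by simp
      have hlen : (U ++ [z]).length = U.length + 1 := by simp
      have hg1 : (U ++ z :: x :: w).getD (U.length + 1) 0 = x := getD_append_cons_succ U z x w
      have hg0 : (U ++ z :: x :: w).getD (U.length + 1 - 1) 0 = z := by
        simpa using getD_append_cons U z (x :: w)
      rw [hassoc, hlen]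
      by_cases hzx : x < z
      · have hswap : pvSwap (U ++ z :: x :: w) (U.length + 1) (U.length + 1 - 1)
            = U ++ x :: z :: w := by
          simpa using pvSwap_left U z x w
        have hstep := sp_inner_step (U ++ z :: x :: w) (U.length + 1) f
          ⟨Nat.succ_pos _, by rw [hg1, hg0]; exact hzx⟩
        rw [hswap] at hstep
        have hga : (U ++ x :: z :: w).getD (U.length + 1) 0 = z := getD_append_cons_succ U x z w
        have hgb : (U ++ x :: z :: w).getD (U.length + 1 - 1) 0 = x := by
          simpa using getD_append_cons U x (z :: w)
        rw [hga, hgb] at hstep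
        set nf := (if z - x = 1 ∧ PySem.Int.mod x 2 = 1 then f + 1 else f) with hnf
        obtain ⟨u1, u2, hsplit, hgt, hlast, heq⟩ := ih (z :: w) nf
        refine ⟨u1, u2 ++ [z], by rw [hsplit]; simp, ?_, hlast, ?_⟩
        · intro t ht
          rcases List.mem_append.mp ht with h1 | h1
          · exact hgt t h1
          · simp at h1; omega
        · rw [hstep]
          have : (U ++ x :: z :: w) = (U ++ x :: (z :: w)) := by simp
          rw [this, show (U.length + 1 - 1 : Nat) = U.length from rfl, heq]
          have hval : nf + List.countP (fun z => decide (z - x = 1 ∧ PySem.Int.mod x 2 = 1)) u2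
              = f + List.countP (fun z => decide (z - x = 1 ∧ PySem.Int.mod x 2 = 1)) (u2 ++ [z]) := by
            rw [List.countP_append, hnf, List.countP_cons, List.countP_nil]
            by_cases hcond : z - x = 1 ∧ PySem.Int.mod x 2 = 1
            · rw [if_pos hcond, if_pos (by simpa using hcond)]
              omega
            · rw [if_neg hcond, if_neg (by simpa using hcond)]
              omega
          rw [hval]
          simp
      · refine ⟨U ++ [z], [], by simp, by simp, ?_, ?_⟩
        · intro y hy
          simp at hy
          subst hy
          omega
        · rw [sp_inner_stop _ _ _ (by rw [hg1, hg0]; intro hc; exact hzx hc.2)]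
          simp

theorem take_append_cons_one (A : List Int) (x : Int) (v : List Int) :
    (A ++ x :: v).take (A.length + 1) = A ++ [x] := by
  rw [List.take_append, List.take_of_length_le (by omega)]
  simp

theorem take_append_cons_two (A : List Int) (x : Int) (v : List Int) :
    (A ++ x :: v).take (A.length + 2) = A ++ x :: v.take 1 := by
  rw [List.take_append, List.take_of_length_le (by omega)]
  simp [List.take_succ_cons]

theorem sp_outer_spec : ∀ (a : List Int) (i f : Nat),
    i + 1 ≤ a.length → List.IsChain (· ≤ ·) (a.take (i + 1)) → sp_outer a i f = f + spW a := by
  intro a i f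
  fun_induction sp_outer a i f with
  | case1 a i f h diff hd a2 nf r ih =>
      intro hlen hch
      obtain ⟨u, p, q, w, ha, hu⟩ := decomp_at a i (by omega)
      have hp : a.getD i 0 = p := by rw [ha, ← hu]; exact getD_append_cons u p (q :: w)
      have hq : a.getD (i + 1) 0 = q := by rw [ha, ← hu]; exact getD_append_cons_succ u p q w
      have hqp : q < p := by
        have hd' : (0:Int) < a.getD i 0 - a.getD (i + 1) 0 := hd
        rw [hp, hq] at hd'; omega
      have ha2 : a2 = u ++ q :: p :: w := by
        simp only [a2]; rw [ha, ← hu]; exact pvSwap_right u p q w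
      have hga2 : a2.getD i 0 = q := by rw [ha2, ← hu]; exact getD_append_cons u q (p :: w)
      have hnf : nf = if p - q = 1 ∧ PySem.Int.mod q 2 = 1 then f + 1 else f := by
        simp only [nf, diff, hp, hq, hga2, dite_eq_ite]
      obtain ⟨u1, u2, hsplit, hgt, hlast, heq⟩ :=
        sp_inner_spec u q (p :: w) (if p - q = 1 ∧ PySem.Int.mod q 2 = 1 then f + 1 else f)
      have hr : r = (u1 ++ q :: (u2 ++ p :: w), u1.length,
          (if p - q = 1 ∧ PySem.Int.mod q 2 = 1 then f + 1 else f) +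
            u2.countP (fun z => decide (z - q = 1 ∧ PySem.Int.mod q 2 = 1))) := by
        simp only [r]; rw [hnf, ha2, ← hu]; exact heq
      rw [hr] at ih ⊢
      dsimp only at ih ⊢
      -- chain precondition for the recursive call
      have hch' : List.IsChain (· ≤ ·) (u ++ [p]) := by
        rw [ha, ← hu, take_append_cons_one] at hch; exact hch
      rw [hsplit, List.append_assoc] at hch'
      rcases List.isChain_append.mp hch' with ⟨hC1, hC2, hRel⟩
      have hpre2 : List.IsChain (· ≤ ·)
          (List.take (u1.length + 1 + 1) (u1 ++ q :: (u2 ++ p :: w))) := by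
        rw [show u1.length + 1 + 1 = u1.length + 2 from rfl, take_append_cons_two]
        apply List.isChain_append.mpr
        refine ⟨hC1, ?_, ?_⟩
        · cases u2 with
          | nil =>
              simp only [List.nil_append, List.take_succ_cons, List.take_zero]
              exact List.isChain_cons_cons.mpr ⟨le_of_lt hqp, by simp⟩
          | cons zz u2' =>
              simp only [List.cons_append, List.take_succ_cons, List.take_zero]
              exact List.isChain_cons_cons.mpr ⟨le_of_lt (hgt zz (by simp)), by simp⟩
        · intro x hx y hy
          simp at hy
          subst hy
          exact hlast x hx
      rw [ih (by simp) hpre2]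
      -- accounting
      set c1 := u2.countP (fun z => decide (z - q = 1 ∧ PySem.Int.mod q 2 = 1)) with hc1def
      set c0 : Nat := if p - q = 1 ∧ PySem.Int.mod q 2 = 1 then 1 else 0 with hc0def
      have hNF : (if p - q = 1 ∧ PySem.Int.mod q 2 = 1 then f + 1 else f) = f + c0 := by
        rw [hc0def]; split_ifs <;> omega
      have hadj := spPairs_swap_adj phiW u q p w
      have hφqp : phiW q p = false := by
        simp only [phiW]; rw [decide_eq_false_iff_not]; intro hcon; omega
      have hφpq : (if phiW p q = true then 1 else 0) = c0 := by
        rw [hc0def]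
        simp only [phiW, decide_eq_true_eq]
        by_cases hcc : p = q + 1 ∧ PySem.Int.mod q 2 = 1
        · rw [if_pos hcc, if_pos ⟨by omega, hcc.2⟩]
        · rw [if_neg hcc, if_neg (by rintro ⟨h1, h2⟩; exact hcc ⟨by omega, h2⟩)]
      have hmove := spPairs_move phiW u2 u1 q (p :: w)
      have hcr1 : spCross phiW u2 [q] = c1 := by
        rw [spCross_singleton_right, hc1def]
        apply List.countP_congr
        intro z hz
        simp only [phiW, decide_eq_true_eq]
        constructor
        · rintro ⟨h1, h2⟩; exact ⟨by omega, h2⟩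
        · rintro ⟨h1, h2⟩; exact ⟨by omega, h2⟩
      have hcr2 : spCross phiW [q] u2 = 0 := by
        rw [spCross_singleton_left]
        apply List.countP_eq_zero.mpr
        intro z hz
        have hz2 := hgt z hz
        simp only [phiW, decide_eq_true_eq]
        rintro ⟨h1, h2⟩
        omega
      rw [hφqp] at hadj
      simp only [Bool.false_eq_true, if_false] at hadj
      rw [hφpq] at hadj
      rw [hcr1, hcr2] at hmove
      rw [hNF, ha]
      rw [hsplit] at hadj ⊢
      simp only [List.append_assoc, spW] at hadj hmove ⊢
      omega
  | case2 a i f h diff hd ih =>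
      intro hlen hch
      obtain ⟨u, p, q, w, ha, hu⟩ := decomp_at a i (by omega)
      have hp : a.getD i 0 = p := by rw [ha, ← hu]; exact getD_append_cons u p (q :: w)
      have hq : a.getD (i + 1) 0 = q := by rw [ha, ← hu]; exact getD_append_cons_succ u p q w
      have hpq : p ≤ q := by
        have hd' : ¬ (0:Int) < a.getD i 0 - a.getD (i + 1) 0 := hd
        rw [hp, hq] at hd'; omega
      apply ih (by omega)
      have hch' : List.IsChain (· ≤ ·) (u ++ [p]) := by
        rw [ha, ← hu, take_append_cons_one] at hch; exact hch
      rw [ha, ← hu, show u.length + 1 + 1 = u.length + 2 from rfl, take_append_cons_two]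
      rw [show (q :: w).take 1 = [q] by simp [List.take_succ_cons]]
      rw [show u ++ p :: [q] = (u ++ [p]) ++ [q] by simp]
      apply List.isChain_append.mpr
      refine ⟨hch', by simp, ?_⟩
      intro x hx y hy
      rw [List.getLast?_concat] at hx
      simp at hx hy
      omega
  | case3 a i f h =>
      intro hlen hch
      rw [List.take_of_length_le (by omega)] at hch
      rw [spW_eq_zero_of_sorted a hch]
      omega

theorem sp_outer_zero (a : List Int) : sp_outer a 0 0 = spW a := by
  cases a with
  | nil => rw [sp_outer]; simp [spW, spPairs]
  | cons x xs =>
      rw [sp_outer_spec (x :: xs) 0 0 (by simp) (by simp)]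
      omega

-- ---- B-side ----

theorem countP_eq_target (A : List Int) (x : Int) (c : Prop) [Decidable c] :
    A.countP (fun s => decide (s = x + 1 ∧ c)) = if c then A.count (x + 1) else 0 := by
  by_cases hc : c
  · simp only [hc, if_true, List.count]
    apply List.countP_congr
    intro s _
    simp
  · simp only [hc, if_false]
    apply List.countP_eq_zero.mpr
    intro s _
    simp only [decide_eq_true_eq]
    exact fun hcon => hcon.2

theorem sp_scan_spec (l : List Int) :
    ∀ (p : List Int) (d : PySem.Dict Int Nat) (f : Nat),
    (∀ v, d.getD v 0 = p.count v) →
    sp_scan l d f = f + spCross phiW p l + spW l := by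
  induction l with
  | nil =>
      intro p d f _
      simp [sp_scan, spCross, spW, spPairs]
  | cons x rest ih =>
      intro p d f hd
      rw [sp_scan]
      have hd' : ∀ v, (d.insert x (d.getD x 0 + 1)).getD v 0 = (p ++ [x]).count v := by
        intro v
        rw [PySem.Dict.getD_insert, hd, List.count_append]
        by_cases hv : v = x
        · subst hv; simp
        · have hcx : List.count v [x] = 0 := by
            simp only [List.count_cons, List.count_nil, beq_iff_eq]
            simp [Ne.symm hv]
          rw [if_neg hv, hcx, hd v, Nat.add_zero]
      rw [ih (p ++ [x]) _ _ hd']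
      rw [hd (x + 1)]
      have h1 : spCross phiW p (x :: rest)
          = (if PySem.Int.mod x 2 = 1 then p.count (x + 1) else 0) + spCross phiW p rest := by
        rw [spCross_cons_right]
        congr 1
        exact countP_eq_target p x _
      have h2 : spCross phiW (p ++ [x]) rest = spCross phiW p rest + rest.countP (phiW x) := by
        rw [spCross_append_left, spCross_singleton_left]
      have h3 : spW (x :: rest) = rest.countP (phiW x) + spW rest := rfl
      rw [h1, h2, h3]
      by_cases hx : PySem.Int.mod x 2 = 1
      · simp only [if_pos hx]
        omega
      · simp only [if_neg hx]
        omega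

theorem sp_scan_eq_spW (a : List Int) : sp_scan a PySem.Dict.empty 0 = spW a := by
  rw [sp_scan_spec a [] PySem.Dict.empty 0 (by intro v; simp [PySem.Dict.getD_empty])]
  simp [spCross_nil_left]

theorem neg_one_pow_eq (n : Nat) : (-1 : Int) ^ n = if n % 2 = 1 then -1 else 1 := by
  rcases Nat.even_or_odd n with h | h
  · rw [h.neg_one_pow, if_neg (by rw [Nat.even_iff] at h; omega)]
  · rw [h.neg_one_pow, if_pos (Nat.odd_iff.mp h)]

-- ===== VERDICT (by name: the statement is the Claim_ definition above) =====
theorem sort_pauli_list_spec : Claim_equal_sort_pauli_list := by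
  intro a _
  unfold Spec_sort_pauli_list sort_pauli_list sort_pauli_list_alt
  rw [sp_outer_zero, sp_scan_eq_spW, neg_one_pow_eq]
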